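-- pv_equiv track=rewrite | github.com/inon-peled/nyt-letter-boxed-solver | main.py | _eligible_pairs
-- ===== SOURCE A (Python) =====
-- def _eligible_pairs(eligible_words, letters):
--     letters_set = set(letters.lower())
--     eligible_pairs = {
--         (w1, w2)
--         for w1 in eligible_words
--         for w2 in eligible_words
--         if (w1[-1] == w2[0]) and (set(w1 + w2) == letters_set)
--     }
--     return eligible_pairs
-- ===== SOURCE B (Python) =====
-- def _eligible_pairs(eligible_words, letters):
--     letters_set = set(letters.lower())
--     by_first = {}
--     for w in eligible_words:
--         by_first.setdefault(w[0], []).append((w, set(w)))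
--     pairs = set()
--     for w1 in eligible_words:
--         s1 = set(w1)
--         for w2, s2 in by_first.get(w1[-1], []):
--             if s1 | s2 == letters_set:
--                 pairs.add((w1, w2))
--     return pairs
-- ===== Notes on version B (the rewrite author's own statement) =====
-- stated objective: faster
-- what changed: B indexes the words by first letter once and precomputes each word's letter set, so for each w1 it scans only the words starting with w1's last letter and tests coverage by a set union instead of rebuilding set(w1+w2) over the full quadratic cross product.
-- outside the precondition, e.g. on _eligible_pairs(['ab', ''], 'ab'): A raises IndexError, B raises IndexError
import Mathlib
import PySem

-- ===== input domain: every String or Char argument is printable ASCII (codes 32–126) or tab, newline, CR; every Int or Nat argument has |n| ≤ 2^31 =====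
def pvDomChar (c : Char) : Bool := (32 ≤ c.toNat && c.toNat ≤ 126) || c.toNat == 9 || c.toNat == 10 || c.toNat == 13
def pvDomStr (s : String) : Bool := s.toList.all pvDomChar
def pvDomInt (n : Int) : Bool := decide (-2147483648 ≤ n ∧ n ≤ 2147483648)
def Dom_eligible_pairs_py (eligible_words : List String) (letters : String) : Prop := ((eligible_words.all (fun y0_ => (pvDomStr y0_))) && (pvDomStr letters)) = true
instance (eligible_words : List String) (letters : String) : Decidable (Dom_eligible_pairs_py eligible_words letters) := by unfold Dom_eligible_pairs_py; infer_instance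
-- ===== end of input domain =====

-- B indexes the words by first letter once and precomputes per-word letter sets, so each w1 scans
-- only the words starting with w1's last letter (objective: faster). Equivalence is about the
-- returned set of pairs (compared as a finite set of distinct elements, per the type convention).

-- ===== PORT A =====
-- the comprehension's filter: (w1[-1] == w2[0]) and (set(w1 + w2) == letters_set)
def pvCondA (lset : PySem.Set Char) (w1 w2 : String) : Bool :=
  (PySem.List.pyGet? w1.toList (-1) == PySem.List.pyGet? w2.toList 0) &&
  PySem.Set.equal (PySem.Set.ofList (w1.toList ++ w2.toList)) lset

def eligible_pairs_py (eligible_words : List String) (letters : String) : List (String × String) :=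
  let lset : PySem.Set Char := PySem.Set.ofList (PySem.Chars.lower letters.toList)
  eligible_words.foldl (fun acc w1 =>
    eligible_words.foldl (fun acc w2 =>
      if pvCondA lset w1 w2 then PySem.Set.add acc (w1, w2) else acc) acc)
    PySem.Set.empty

-- ===== PORT B =====
-- by_first.setdefault(w[0], []).append((w, set(w)))  — none (empty word, Python raises) skips
def pvGroup (ws : List String) : PySem.Dict Char (List (String × PySem.Set Char)) :=
  ws.foldl (fun d w =>
    match PySem.List.pyGet? w.toList 0 with
    | some c => d.insert c (d.getD c [] ++ [(w, PySem.Set.ofList w.toList)])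
    | none => d) PySem.Dict.empty

def eligible_pairs_py_alt (eligible_words : List String) (letters : String) : List (String × String) :=
  let lset : PySem.Set Char := PySem.Set.ofList (PySem.Chars.lower letters.toList)
  let byFirst := pvGroup eligible_words
  eligible_words.foldl (fun acc w1 =>
    let s1 : PySem.Set Char := PySem.Set.ofList w1.toList
    match PySem.List.pyGet? w1.toList (-1) with
    | some c =>
      (byFirst.getD c []).foldl (fun acc p =>
        if PySem.Set.equal (PySem.Set.union s1 p.2) lset
        then PySem.Set.add acc (w1, p.1) else acc) acc
    | none => acc)
    PySem.Set.empty

-- ===== PRECONDITION & SPEC =====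
-- Pre_ excludes inputs containing an empty word, on which A raises IndexError (w1[-1]).
def Pre_eligible_pairs_py (eligible_words : List String) (letters : String) : Prop :=
  "" ∉ eligible_words
instance (eligible_words : List String) (letters : String) : Decidable (Pre_eligible_pairs_py eligible_words letters) := by unfold Pre_eligible_pairs_py; infer_instance
def pvWitness_eligible_pairs_py : List String × String := (["ab", "ba"], "ab")

def Spec_eligible_pairs_py (eligible_words : List String) (letters : String) (out : List (String × String)) : Prop := out = eligible_pairs_py_alt eligible_words letters
instance (eligible_words : List String) (letters : String) (out : List (String × String)) : Decidable (Spec_eligible_pairs_py eligible_words letters out) := by unfold Spec_eligible_pairs_py; infer_instance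

-- ===== CLAIM (what is proved, stated in full; the proofs are below) =====
def Claim_equal_eligible_pairs_py : Prop := ∀ (eligible_words : List String) (letters : String), Dom_eligible_pairs_py eligible_words letters → Pre_eligible_pairs_py eligible_words letters → Spec_eligible_pairs_py eligible_words letters (eligible_pairs_py eligible_words letters)

-- ===== LEMMAS AND PROOFS =====

-- the group dict lists, per first letter, exactly the words with that first letter, in order
theorem pvGroup_getD (ws : List String) (d : PySem.Dict Char (List (String × PySem.Set Char))) (c : Char) :
    (ws.foldl (fun d w =>
      match PySem.List.pyGet? w.toList 0 with
      | some c => d.insert c (d.getD c [] ++ [(w, PySem.Set.ofList w.toList)])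
      | none => d) d).getD c []
    = d.getD c [] ++ (ws.filter (fun w => PySem.List.pyGet? w.toList 0 == some c)).map
        (fun w => (w, PySem.Set.ofList w.toList)) := by
  induction ws generalizing d with
  | nil => simp
  | cons w ws ih =>
    simp only [List.foldl_cons, List.filter_cons]
    cases hw : PySem.List.pyGet? w.toList 0 with
    | none => simpa [hw] using ih d
    | some c' =>
      rw [ih]
      by_cases hc : c = c'
      · subst hc
        simp
      · simp [PySem.Dict.getD_insert, hc, Ne.symm hc]

-- the coverage test: set(w1+w2) == letters_set  ↔  set(w1) | set(w2) == letters_set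
theorem pvCover_eq (a b : List Char) (l : PySem.Set Char) :
    PySem.Set.equal (PySem.Set.ofList (a ++ b)) l
    = PySem.Set.equal (PySem.Set.union (PySem.Set.ofList a) (PySem.Set.ofList b)) l := by
  rw [Bool.eq_iff_iff, PySem.Set.equal_iff, PySem.Set.equal_iff]
  constructor <;> intro h x <;>
    simpa [PySem.Set.mem_union, PySem.Set.mem_ofList] using h x

-- A's inner scan over all words = B's scan over the group of words starting with w1's last letter
theorem pvInner_eq (lset : PySem.Set Char) (w1 : String) (c : Char)
    (hc : PySem.List.pyGet? w1.toList (-1) = some c) (ws : List String)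
    (acc : PySem.Set (String × String)) :
    ws.foldl (fun acc w2 => if pvCondA lset w1 w2 then PySem.Set.add acc (w1, w2) else acc) acc
    = ((ws.filter (fun w => PySem.List.pyGet? w.toList 0 == some c)).map
        (fun w => (w, PySem.Set.ofList w.toList))).foldl
        (fun acc p => if PySem.Set.equal (PySem.Set.union (PySem.Set.ofList w1.toList) p.2) lset
          then PySem.Set.add acc (w1, p.1) else acc) acc := by
  induction ws generalizing acc with
  | nil => simp
  | cons w2 ws ih =>
    simp only [List.foldl_cons, List.filter_cons]
    by_cases hw : PySem.List.pyGet? w2.toList 0 = some c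
    · have hcond : pvCondA lset w1 w2
        = PySem.Set.equal (PySem.Set.union (PySem.Set.ofList w1.toList)
            (PySem.Set.ofList w2.toList)) lset := by
        simp [pvCondA, hc, hw, pvCover_eq]
      simp only [hw, beq_self_eq_true, if_true, List.map_cons, List.foldl_cons, hcond]
      exact ih _
    · have hcond : pvCondA lset w1 w2 = false := by
        simp [pvCondA, hc]
        intro h
        exact absurd h.symm hw
      simp only [hcond]
      have : (PySem.List.pyGet? w2.toList 0 == some c) = false := by
        simpa using hw
      simp only [this]
      exact ih _

-- a nonempty word has a last character (w1[-1] returns)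
theorem pvLast_some (w : String) (h : w ≠ "") :
    ∃ c, PySem.List.pyGet? w.toList (-1) = some c := by
  have hne : w.toList ≠ [] := by
    simpa [String.toList_eq_nil_iff] using h
  have hlen : 0 < w.toList.length := List.length_pos_iff.mpr hne
  refine ⟨w.toList.getLast hne, ?_⟩
  simp only [PySem.List.pyGet?, PySem.List.pyIdx?]
  have h1 : ¬ ((0:Int) ≤ -1) := by norm_num
  have h2 : -(w.toList.length : Int) ≤ -1 := by omega
  simp only [h1, if_false, h2, if_true, Option.bind]
  have : w.toList.length - ((1:Int)).toNat = w.toList.length - 1 := by norm_num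
  rw [List.getElem?_eq_getElem (by omega)]
  simp [List.getLast_eq_getElem]

-- ===== VERDICT (by name: the statement is the Claim_ definition above) =====
theorem eligible_pairs_py_spec : Claim_equal_eligible_pairs_py := by
  intro ws letters _hdom hpre
  unfold Spec_eligible_pairs_py eligible_pairs_py eligible_pairs_py_alt
  simp only []
  apply PySem.List.foldl_congr_mem
  intro acc w1 hw1
  have hne : w1 ≠ "" := fun h => hpre (h ▸ hw1)
  obtain ⟨c, hc⟩ := pvLast_some w1 hne
  simp only [hc]
  rw [pvInner_eq _ _ _ hc]
  unfold pvGroup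
  rw [pvGroup_getD]
  simp [PySem.Dict.getD, PySem.Dict.empty, PySem.Dict.get?]
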